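-- pv_equiv track=rewrite | github.com/whisperH/ConRFL | reid/utils/my_tools.py | domain_class_map
-- ===== SOURCE A (Python) =====
-- def domain_class_map(each_domain_class_num):
--     map_list = {}
--     for i in range(len(each_domain_class_num)-1):
--         if i == 0:
--             start_pos = 0
--         else:
--             start_pos = start_pos + each_domain_class_num[i-1]
--
--         class_num = each_domain_class_num[i] + each_domain_class_num[i+1]
--         map_list[i] = [start_pos, start_pos+class_num]
--
--     return map_list
-- ===== SOURCE B (Python) =====
-- def domain_class_map(each_domain_class_num):
--     # materialize a prefix-sum table, then build the map in one indexed pass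
--     prefix = [0]
--     s = 0
--     for x in each_domain_class_num:
--         s += x
--         prefix.append(s)
--     return {i: [prefix[i], prefix[i] + each_domain_class_num[i] + each_domain_class_num[i + 1]]
--             for i in range(len(each_domain_class_num) - 1)}
-- ===== Notes on version B (the rewrite author's own statement) =====
-- stated objective: alternative
-- what changed: Replaces the threaded start_pos accumulator inside the dict-building loop by a materialized prefix-sum table consumed by a separate indexed dict comprehension.
import Mathlib
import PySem

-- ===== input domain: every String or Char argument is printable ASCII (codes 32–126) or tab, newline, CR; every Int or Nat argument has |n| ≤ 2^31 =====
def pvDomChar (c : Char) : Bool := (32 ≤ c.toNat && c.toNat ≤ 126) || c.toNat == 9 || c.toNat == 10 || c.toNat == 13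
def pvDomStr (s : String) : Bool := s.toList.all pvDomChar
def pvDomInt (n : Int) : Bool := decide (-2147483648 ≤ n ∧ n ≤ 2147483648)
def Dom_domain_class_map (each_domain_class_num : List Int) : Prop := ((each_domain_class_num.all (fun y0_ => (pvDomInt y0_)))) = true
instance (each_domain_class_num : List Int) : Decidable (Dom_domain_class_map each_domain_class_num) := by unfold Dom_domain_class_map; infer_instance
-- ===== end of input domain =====

-- B replaces A's threaded start_pos accumulator by a materialized prefix-sum table
-- consumed by a separate indexed pass (alternative decomposition, same O(n) cost).


-- ===== PORT A =====
-- the dict is returned as its items list; all list indices A uses are in range,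
-- so pyGetD with default 0 is exact
def domain_class_map (each_domain_class_num : List Int) : List (Int × List Int) :=
  ((PySem.List.pyRange 0 ((each_domain_class_num.length : Int) - 1) 1).foldl
    (fun (st : PySem.Dict Int (List Int) × Int) i =>
      let start_pos : Int :=
        if i == 0 then 0 else st.2 + PySem.List.pyGetD each_domain_class_num (i - 1) 0
      let class_num : Int :=
        PySem.List.pyGetD each_domain_class_num i 0 +
        PySem.List.pyGetD each_domain_class_num (i + 1) 0
      (st.1.insert i [start_pos, start_pos + class_num], start_pos))
    (PySem.Dict.empty, 0)).1.items

-- ===== PORT B =====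
-- dict comprehension over distinct keys = the items list directly, via map
def domain_class_map_alt (each_domain_class_num : List Int) : List (Int × List Int) :=
  let pr := each_domain_class_num.foldl
    (fun (st : List Int × Int) x => (st.1 ++ [st.2 + x], st.2 + x)) ([0], 0)
  (PySem.List.pyRange 0 ((each_domain_class_num.length : Int) - 1) 1).map
    (fun i => (i, [PySem.List.pyGetD pr.1 i 0,
                   PySem.List.pyGetD pr.1 i 0 +
                   PySem.List.pyGetD each_domain_class_num i 0 +
                   PySem.List.pyGetD each_domain_class_num (i + 1) 0]))

-- ===== PRECONDITION & SPEC =====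
def Spec_domain_class_map (each_domain_class_num : List Int) (out : List (Int × List Int)) : Prop := out = domain_class_map_alt each_domain_class_num
instance (each_domain_class_num : List Int) (out : List (Int × List Int)) : Decidable (Spec_domain_class_map each_domain_class_num out) := by unfold Spec_domain_class_map; infer_instance

-- ===== CLAIM (what is proved, stated in full; the proofs are below) =====
def Claim_equal_domain_class_map : Prop := ∀ (each_domain_class_num : List Int), Dom_domain_class_map each_domain_class_num → Spec_domain_class_map each_domain_class_num (domain_class_map each_domain_class_num)

-- ===== LEMMAS AND PROOFS =====

/-- prefix sums of `l` starting after running total `s` (proof-only helper) -/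
def pvPf (s : Int) : List Int → List Int
  | [] => []
  | x :: t => (s + x) :: pvPf (s + x) t

/-- sum of the first `k` elements -/
def pvP (a : List Int) (k : Nat) : Int := (a.take k).sum

theorem pvP_succ (a : List Int) (k : Nat) :
    pvP a (k + 1) = pvP a k + PySem.List.pyGetD a (k : Int) 0 := by
  simp [pvP, List.take_succ, PySem.List.pyGetD_natCast, List.getD_eq_getElem?_getD]
  cases h : a[k]? <;> simp [h]

theorem pvBfold (l : List Int) (acc : List Int) (s : Int) :
    l.foldl (fun (st : List Int × Int) x => (st.1 ++ [st.2 + x], st.2 + x)) (acc, s)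
      = (acc ++ pvPf s l, s + l.sum) := by
  induction l generalizing acc s with
  | nil => simp [pvPf]
  | cons x t ih => simp [pvPf, ih, add_assoc]

theorem pvPf_getD (l : List Int) (s : Int) (k : Nat) (h : k < l.length) :
    (pvPf s l).getD k 0 = s + (l.take (k + 1)).sum := by
  induction l generalizing s k with
  | nil => simp at h
  | cons x t ih =>
    cases k with
    | zero => simp [pvPf]
    | succ k =>
      simp only [pvPf, List.getD_cons_succ, List.take_succ_cons, List.sum_cons]
      rw [ih (s + x) k (by simpa using h)]
      ring

theorem pvPrefix_getD (a : List Int) (k : Nat) (hk : k ≤ a.length) :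
    ((0 : Int) :: pvPf 0 a).getD k 0 = pvP a k := by
  cases k with
  | zero => simp [pvP]
  | succ k =>
    simp only [List.getD_cons_succ]
    rw [pvPf_getD a 0 k (by omega)]; simp [pvP]

theorem pvAfold (a : List Int) (m : Nat) :
    (PySem.List.pyRange 0 (m : Int) 1).foldl
      (fun (st : PySem.Dict Int (List Int) × Int) i =>
        let start_pos : Int :=
          if i == 0 then 0 else st.2 + PySem.List.pyGetD a (i - 1) 0
        let class_num : Int :=
          PySem.List.pyGetD a i 0 + PySem.List.pyGetD a (i + 1) 0
        (st.1.insert i [start_pos, start_pos + class_num], start_pos))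
      (PySem.Dict.empty, 0)
    = (PySem.Dict.mk ((List.range m).map (fun (k : Nat) =>
          ((k : Int), [pvP a k, pvP a k +
            (PySem.List.pyGetD a (k : Int) 0 + PySem.List.pyGetD a ((k : Int) + 1) 0)]))),
        pvP a (m - 1)) := by
  induction m with
  | zero => simp [PySem.List.pyRange_one_eq_nil, pvP, PySem.Dict.empty]
  | succ m ih =>
    have hcast : ((m + 1 : Nat) : Int) = (m : Int) + 1 := by push_cast; ring
    rw [hcast, PySem.List.pyRange_one_succ_right (by positivity), List.foldl_append, ih]
    simp only [List.foldl_cons, List.foldl_nil]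
    have hfresh : (PySem.Dict.mk ((List.range m).map (fun (k : Nat) =>
          ((k : Int), [pvP a k, pvP a k +
            (PySem.List.pyGetD a (k : Int) 0 + PySem.List.pyGetD a ((k : Int) + 1) 0)])))).contains (m : Int) = false := by
      simp only [PySem.Dict.contains_mk, List.any_map, List.any_eq_false]
      intro k hk
      simp only [List.mem_range] at hk
      simp
      omega
    have hstep : ∀ (q : Nat), pvP a q + PySem.List.pyGetD a ((q : Nat) : Int) 0 = pvP a (q + 1) :=
      fun q => (pvP_succ a q).symm
    cases m with
    | zero =>
      simp only [Prod.mk.injEq, PySem.Dict.ext_iff]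
      refine ⟨?_, ?_⟩
      · rw [PySem.Dict.items_insert_of_not_contains _ _ hfresh]
        simp [pvP, List.range_succ]
        simp only [PySem.List.pyGetD, PySem.List.pyGet?, PySem.List.pyIdx?]
        by_cases h : 0 < a.length
        · simp [h]
        · simp [h, List.getElem?_eq_none (by omega : a.length ≤ 0)]
      · simp [pvP]
    | succ m' =>
      have hne : (((m' + 1 : Nat) : Int) == 0) = false := by
        simp only [beq_eq_false_iff_ne, ne_eq]
        push_cast
        omega
      have hidx : (((m' + 1 : Nat) : Int) - 1) = ((m' : Nat) : Int) := by push_cast; ring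
      simp only [Prod.mk.injEq, PySem.Dict.ext_iff]
      refine ⟨?_, ?_⟩
      · rw [PySem.Dict.items_insert_of_not_contains _ _ hfresh]
        simp only [hne, Bool.false_eq_true, if_false, hidx, Nat.add_sub_cancel, hstep m',
          List.range_succ, List.map_append, List.map_cons, List.map_nil]

      · simp only [hne, Bool.false_eq_true, if_false, hidx, Nat.add_sub_cancel, hstep m']

-- ===== VERDICT (by name: the statement is the Claim_ definition above) =====
theorem pvRange_len_sub_one (a : List Int) :
    PySem.List.pyRange 0 ((a.length : Int) - 1) 1
      = PySem.List.pyRange 0 ((a.length - 1 : Nat) : Int) 1 := by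
  cases a with
  | nil => simp [PySem.List.pyRange_one_eq_nil]
  | cons x t => congr 1; push_cast [List.length_cons]; omega

theorem domain_class_map_spec : Claim_equal_domain_class_map := by
  intro a _
  show domain_class_map a = domain_class_map_alt a
  unfold domain_class_map domain_class_map_alt
  rw [pvRange_len_sub_one, pvAfold a (a.length - 1), pvBfold]
  simp only [PySem.List.pyRange_one]
  rw [List.map_map]
  simp only [sub_zero, Int.toNat_natCast]
  apply List.map_congr_left
  intro k hk
  simp only [List.mem_range] at hk
  have hk' : k < a.length := by omega
  have hpre : PySem.List.pyGetD ([(0 : Int)] ++ pvPf 0 a) ((k : Int)) 0 = pvP a k := by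
    rw [List.singleton_append, PySem.List.pyGetD_natCast]
    exact pvPrefix_getD a k (by omega)
  simp only [Function.comp_apply, zero_add, hpre, Prod.mk.injEq, List.cons.injEq,
    and_true, true_and]
  ring
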